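-- pv_equiv track=rewrite | github.com/VarunReddyT/FS | 112 28-10-25 Py + AWS + Linux/EmphasizeWords.py | emphasizeWords
-- ===== SOURCE A (Python) =====
-- def emphasizeWords(word,words):
--     n = len(word)
--     arr = [False]*n
--     res = ""
--     for x in words:
--         currIdx = 0
--         while True:
--             idx = word.find(x,currIdx)
--             if idx == -1:
--                 break
--             for i in range(idx, idx + len(x)):
--                 arr[i] = True
--             currIdx = idx + 1
--     i = 0
--     while i<n:
--         if arr[i]:
--             res += "<i>"
--             while i<n and arr[i]:
--                 res += word[i]
--                 i += 1
--             res += "</i>"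
--         else:
--             res += word[i]
--             i += 1
--     return res
-- ===== SOURCE B (Python) =====
-- def emphasizeWords(word, words):
--     n = len(word)
--     # index the patterns by their first character (empty patterns can never cover anything)
--     byfirst = {}
--     for w in words:
--         if w:
--             byfirst.setdefault(w[0], []).append(w)
--     # one left-to-right sweep keeping the farthest covered end so far
--     end = 0
--     mask = []
--     empty = []
--     for i in range(n):
--         for w in byfirst.get(word[i], empty):
--             if word.startswith(w, i):
--                 e = i + len(w)
--                 if e > end:
--                     end = e
--         mask.append(i < end)
--     parts = []
--     prev = False
--     for c, b, nb in zip(word, mask, mask[1:] + [False]):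
--         if b and not prev:
--             parts.append("<i>")
--         parts.append(c)
--         if b and not nb:
--             parts.append("</i>")
--         prev = b
--     return "".join(parts)
-- ===== Notes on version B (the rewrite author's own statement) =====
-- stated objective: alternative
-- what changed: replaces A's per-pattern repeated str.find marking loop plus nested-while tag grouping by a single left-to-right position sweep: patterns are indexed by first character in a dict built once, a running farthest-covered-end pointer yields the flag mask, and <i>/</i> tags are emitted from each position's neighbour flags in one zip pass
import Mathlib
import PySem

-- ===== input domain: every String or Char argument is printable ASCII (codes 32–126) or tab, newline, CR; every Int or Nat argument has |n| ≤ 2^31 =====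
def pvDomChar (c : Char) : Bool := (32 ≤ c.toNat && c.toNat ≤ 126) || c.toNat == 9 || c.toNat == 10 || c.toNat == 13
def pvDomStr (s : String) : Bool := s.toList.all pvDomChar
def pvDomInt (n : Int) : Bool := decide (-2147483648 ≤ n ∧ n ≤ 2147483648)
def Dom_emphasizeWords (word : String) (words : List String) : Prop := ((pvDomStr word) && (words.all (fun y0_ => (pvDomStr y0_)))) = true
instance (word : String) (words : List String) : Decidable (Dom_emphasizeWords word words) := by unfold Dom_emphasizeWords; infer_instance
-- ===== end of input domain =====

-- B replaces A's per-pattern repeated str.find marking and nested-while tag grouping by a single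
-- left-to-right sweep: patterns indexed by first character in a dict built once, a running
-- farthest-covered-end pointer yields the flag mask, tags come from neighbour flags in one zip
-- pass (objective: alternative; no speed claim).

-- ===== PORT A =====
-- `for i in range(idx, idx + len(x)): arr[i] = True`
def markRange (arr : List Bool) (j m : Nat) : List Bool :=
  (List.range' j m).foldl (fun a i => a.set i true) arr

-- the `while True: idx = word.find(x, currIdx) …` loop of A; fuel bounds the iterations
-- (currIdx grows by at least 1 each round and find fails once it passes len(word))
def markLoopA (cs x : List Char) : Nat → Nat → List Bool → List Bool
  | 0, _, arr => arr
  | fuel+1, curr, arr =>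
    let idx := PySem.Chars.findFrom cs x (curr : Int) none
    if idx = -1 then arr
    else markLoopA cs x fuel (idx.toNat + 1) (markRange arr idx.toNat x.length)

-- the output loop of A: `while i<n: if arr[i]: "<i>" + run + "</i>" else word[i]`,
-- on the word zipped with its flag array (the two are indexed in lockstep)
def buildA : List (Char × Bool) → String
  | [] => ""
  | (c, b) :: rest =>
    if b then
      "<i>" ++ String.ofList (c :: (rest.takeWhile (·.2)).map (·.1)) ++ "</i>"
        ++ buildA (rest.dropWhile (·.2))
    else String.ofList [c] ++ buildA rest
termination_by l => l.length
decreasing_by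
  · simpa using Nat.lt_succ_of_le (rest.length_dropWhile_le (·.2))
  · simp

def emphasizeWords (word : String) (words : List String) : String :=
  let cs := word.toList
  let arr := words.foldl (fun arr x => markLoopA cs x.toList (cs.length + 2) 0 arr)
    (List.replicate cs.length false)
  buildA (cs.zip arr)

-- ===== PORT B =====
-- first loop of Source B: the patterns indexed by first character (empty patterns skipped)
def byFirst (ws : List (List Char)) : PySem.Dict Char (List (List Char)) :=
  ws.foldl (fun d w => match w with
    | [] => d
    | c :: _ => d.modify c [] (· ++ [w])) PySem.Dict.empty

-- second loop of Source B: running farthest-covered-end pointer, state (end, mask);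
-- `byfirst.get(word[i], empty)` is the getD below (i < n always, so the getD default of word[i] is unreachable)
def maskB (cs : List Char) (ws : List (List Char)) : List Bool :=
  ((List.range cs.length).foldl (fun (st : Nat × List Bool) i =>
      let e := ((byFirst ws).getD (cs.getD i ' ') []).foldl (fun e w =>
        if PySem.Chars.startswith (cs.drop i) w then
          (if i + w.length > e then i + w.length else e)
        else e) st.1
      (e, st.2 ++ [decide (i < e)])) (0, [])).2

-- last loop of Source B: `for c, b, nb in zip(word, mask, mask[1:]+[False])` with prev flag
def buildB (l : List ((Char × Bool) × Bool)) : String :=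
  (l.foldl (fun (st : Bool × String) p =>
      (p.1.2, st.2 ++ (if p.1.2 && !st.1 then "<i>" else "") ++ String.ofList [p.1.1]
        ++ (if p.1.2 && !p.2 then "</i>" else ""))) (false, "")).2

def emphasizeWords_alt (word : String) (words : List String) : String :=
  let cs := word.toList
  let mask := maskB cs (words.map (·.toList))
  buildB ((cs.zip mask).zip (mask.drop 1 ++ [false]))

-- ===== PRECONDITION & SPEC =====
def Spec_emphasizeWords (word : String) (words : List String) (out : String) : Prop := out = emphasizeWords_alt word words
instance (word : String) (words : List String) (out : String) : Decidable (Spec_emphasizeWords word words out) := by unfold Spec_emphasizeWords; infer_instance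

-- ===== CLAIM (what is proved, stated in full; the proofs are below) =====
def Claim_equal_emphasizeWords : Prop := ∀ (word : String) (words : List String), Dom_emphasizeWords word words → Spec_emphasizeWords word words (emphasizeWords word words)

-- ===== LEMMAS AND PROOFS =====

-- position i of cs lies inside an occurrence of some pattern of ws
def covered (cs : List Char) (ws : List (List Char)) (i : Nat) : Prop :=
  ∃ w ∈ ws, ∃ j, w <+: cs.drop j ∧ j ≤ i ∧ i < j + w.length

-- proof-side recursion computing B's output shape: prev flag in, next flag peeked from the rest
def gBnext : List (Char × Bool) → Bool
  | [] => false
  | p :: _ => p.2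

def gB : Bool → List (Char × Bool) → String
  | _, [] => ""
  | prev, (c, b) :: rest =>
    (if b && !prev then "<i>" else "") ++ String.ofList [c]
      ++ (if b && !gBnext rest then "</i>" else "") ++ gB b rest

lemma markRange_length (m j : Nat) (arr : List Bool) : (markRange arr j m).length = arr.length := by
  unfold markRange
  induction m generalizing j arr with
  | zero => simp
  | succ m ih => rw [List.range'_succ]; simp [List.foldl_cons, ih]

lemma markRange_getD (m j : Nat) (arr : List Bool) (h : j + m ≤ arr.length) (i : Nat) :
    (markRange arr j m).getD i false = (arr.getD i false || decide (j ≤ i ∧ i < j + m)) := by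
  unfold markRange
  induction m generalizing j arr with
  | zero => simp
  | succ m ih =>
    rw [List.range'_succ]
    simp only [List.foldl_cons]
    rw [ih _ _ (by simp; omega)]
    rcases Nat.lt_or_ge i arr.length with hi | hi
    · by_cases hij : i = j
      · subst hij
        simp [List.getD_eq_getElem?_getD, hi]
      · simp only [List.getD_eq_getElem?_getD, List.getElem?_set_ne (by omega : j ≠ i)]
        have : (j < i ∧ i < j + 1 + m) ↔ (j ≤ i ∧ i < j + (m + 1)) := by omega
        simp [this]
    · have h1 : (arr.set j true)[i]? = none := by
        rw [List.getElem?_eq_none_iff]; simpa using hi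
      have h2 : arr[i]? = none := by rw [List.getElem?_eq_none_iff]; exact hi
      simp only [List.getD_eq_getElem?_getD, h1, h2, Option.getD_none]
      have e1 : decide (j+1 ≤ i ∧ i < j+1+m) = false := by simp; omega
      have e2 : decide (j ≤ i ∧ i < j+(m+1)) = false := by simp; omega
      simp [e2]
      omega

lemma findFrom_gt (cs x : List Char) (k : Nat) (h : cs.length < k) :
    PySem.Chars.findFrom cs x (k : Int) none = -1 := by
  simp only [PySem.Chars.findFrom]
  have h1 : ¬ ((k:Int) < 0) := by omega
  simp only [h1, if_false]
  rw [if_pos (by exact_mod_cast h)]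

lemma findFrom_none (cs x : List Char) (k : Nat) (hk : k ≤ cs.length)
    (h : PySem.Chars.findFrom cs x (k : Int) none = -1) :
    ∀ j, k ≤ j → ¬ x <+: cs.drop j := by
  rw [PySem.Chars.findFrom_natCast_eq_neg_one_iff cs x k hk] at h
  intro j hj hp
  apply h
  have h3 : x <+: (cs.drop k).drop (j - k) := by
    rw [List.drop_drop]
    have e : k + (j - k) = j := by omega
    rwa [e]
  have h2 : PySem.Chars.isIn x (cs.drop k) = true :=
    (PySem.Chars.exists_prefix_drop_iff_isIn _ _).mp ⟨_, h3⟩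
  exact (PySem.Chars.isIn_iff_infix _ _).mp h2

-- a covering occurrence start lies inside cs (so the pattern is nonempty there)
lemma cover_bounds {cs x : List Char} {i j : Nat} (hp : x <+: cs.drop j) (hji : j ≤ i)
    (hix : i < j + x.length) : j < cs.length ∧ j + x.length ≤ cs.length := by
  have hlen : x.length ≤ (cs.drop j).length := hp.length_le
  rw [List.length_drop] at hlen
  omega

lemma markLoopA_spec (cs x : List Char) :
    ∀ (fuel curr : Nat) (arr : List Bool), arr.length = cs.length →
      cs.length + 2 ≤ fuel + curr →
      (markLoopA cs x fuel curr arr).length = cs.length ∧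
      ∀ i, ((markLoopA cs x fuel curr arr).getD i false = true ↔
        arr.getD i false = true ∨
          ∃ j, curr ≤ j ∧ x <+: cs.drop j ∧ j ≤ i ∧ i < j + x.length) := by
  intro fuel
  induction fuel with
  | zero =>
    intro curr arr hlen hfuel
    refine ⟨hlen, fun i => ⟨fun h => Or.inl h, ?_⟩⟩
    rintro (h | ⟨j, hj, hp, hji, hix⟩)
    · exact h
    · exact absurd ((cover_bounds hp hji hix).1) (by omega)
  | succ fuel ih =>
    intro curr arr hlen hfuel
    rcases Nat.lt_or_ge cs.length curr with hc | hc
    · simp only [markLoopA, findFrom_gt cs x curr hc]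
      refine ⟨hlen, fun i => ⟨fun h => Or.inl h, ?_⟩⟩
      rintro (h | ⟨j, hj, hp, hji, hix⟩)
      · exact h
      · exact absurd ((cover_bounds hp hji hix).1) (by omega)
    · by_cases hf : PySem.Chars.findFrom cs x (curr : Int) none = -1
      · simp only [markLoopA, hf]
        refine ⟨hlen, fun i => ⟨fun h => Or.inl h, ?_⟩⟩
        rintro (h | ⟨j, hj, hp, hji, hix⟩)
        · exact h
        · exact absurd hp (findFrom_none cs x curr hc hf j hj)
      · obtain ⟨hr1, hr2, hr3⟩ := PySem.Chars.findFrom_natCast_spec cs x curr hc hf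
        simp only [markLoopA, if_neg hf]
        have hcr : curr ≤ (PySem.Chars.findFrom cs x (curr : Int) none).toNat := by omega
        set r := (PySem.Chars.findFrom cs x (curr : Int) none).toNat with hrdef
        by_cases hx : x = []
        · subst hx
          have hmr : markRange arr r 0 = arr := by simp [markRange]
          simp only [List.length_nil, hmr, Nat.add_zero]
          obtain ⟨ihl, ihs⟩ := ih (r + 1) arr hlen (by omega)
          refine ⟨ihl, fun i => ?_⟩
          rw [ihs i]
          constructor
          · rintro (h | ⟨j, hj, hp, hji, hix⟩)
            · exact Or.inl h
            · have hz : ([] : List Char).length = 0 := rfl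
              omega
          · rintro (h | ⟨j, hj, hp, hji, hix⟩)
            · exact Or.inl h
            · have hz : ([] : List Char).length = 0 := rfl
              omega
        · have hxl : 1 ≤ x.length := by
            cases x with | nil => exact absurd rfl hx | cons a t => simp
          have hrb : r + x.length ≤ cs.length := by
            have := hr2.length_le
            rw [List.length_drop] at this
            omega
          obtain ⟨ihl, ihs⟩ := ih (r + 1) (markRange arr r x.length)
            (by rw [markRange_length]; exact hlen) (by omega)
          refine ⟨ihl, fun i => ?_⟩
          rw [ihs i, markRange_getD x.length r arr (by omega) i]
          simp only [Bool.or_eq_true, decide_eq_true_eq]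
          constructor
          · rintro ((h | ⟨h1, h2⟩) | ⟨j, hj, hp, hji, hix⟩)
            · exact Or.inl h
            · exact Or.inr ⟨r, hcr, hr2, h1, h2⟩
            · exact Or.inr ⟨j, by omega, hp, hji, hix⟩
          · rintro (h | ⟨j, hj, hp, hji, hix⟩)
            · exact Or.inl (Or.inl h)
            · rcases Nat.lt_trichotomy j r with hjr | hjr | hjr
              · exact absurd hp (hr3 j hj hjr)
              · subst hjr
                exact Or.inl (Or.inr ⟨hji, hix⟩)
              · exact Or.inr ⟨j, by omega, hp, hji, hix⟩

lemma arrA_spec (cs : List Char) (ws : List String) :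
    ∀ (arr : List Bool), arr.length = cs.length →
      (ws.foldl (fun arr x => markLoopA cs x.toList (cs.length + 2) 0 arr) arr).length = cs.length ∧
      ∀ i, ((ws.foldl (fun arr x => markLoopA cs x.toList (cs.length + 2) 0 arr) arr).getD i false = true ↔
        arr.getD i false = true ∨ covered cs (ws.map (·.toList)) i) := by
  induction ws with
  | nil =>
    intro arr hlen
    refine ⟨hlen, fun i => ?_⟩
    simp [covered]
  | cons w ws ih =>
    intro arr hlen
    simp only [List.foldl_cons]
    obtain ⟨m1, m2⟩ := markLoopA_spec cs w.toList (cs.length + 2) 0 arr hlen (by omega)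
    obtain ⟨f1, f2⟩ := ih (markLoopA cs w.toList (cs.length + 2) 0 arr) m1
    refine ⟨f1, fun i => ?_⟩
    rw [f2 i, m2 i]
    simp only [covered, List.map_cons, List.mem_cons]
    constructor
    · rintro ((h | ⟨j, _, hp, hji, hix⟩) | ⟨v, hv, j, hp, hji, hix⟩)
      · exact Or.inl h
      · exact Or.inr ⟨w.toList, Or.inl rfl, j, hp, hji, hix⟩
      · exact Or.inr ⟨v, Or.inr hv, j, hp, hji, hix⟩
    · rintro (h | ⟨v, hv | hv, j, hp, hji, hix⟩)
      · exact Or.inl (Or.inl h)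
      · subst hv; exact Or.inl (Or.inr ⟨j, Nat.zero_le _, hp, hji, hix⟩)
      · exact Or.inr ⟨v, hv, j, hp, hji, hix⟩

lemma innerFold_spec (cs : List Char) (i : Nat) (ws : List (List Char)) :
    ∀ e0 : Nat,
      e0 ≤ ws.foldl (fun e w => if PySem.Chars.startswith (cs.drop i) w then (if i + w.length > e then i + w.length else e) else e) e0 ∧
      (∀ w ∈ ws, w <+: cs.drop i → i + w.length ≤ ws.foldl (fun e w => if PySem.Chars.startswith (cs.drop i) w then (if i + w.length > e then i + w.length else e) else e) e0) ∧
      (ws.foldl (fun e w => if PySem.Chars.startswith (cs.drop i) w then (if i + w.length > e then i + w.length else e) else e) e0 = e0 ∨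
        ∃ w ∈ ws, w <+: cs.drop i ∧ ws.foldl (fun e w => if PySem.Chars.startswith (cs.drop i) w then (if i + w.length > e then i + w.length else e) else e) e0 = i + w.length) := by
  induction ws with
  | nil => intro e0; simp
  | cons w ws ih =>
    intro e0
    simp only [List.foldl_cons]
    set e1 := (if PySem.Chars.startswith (cs.drop i) w then (if i + w.length > e0 then i + w.length else e0) else e0) with he1
    obtain ⟨ih1, ih2, ih3⟩ := ih e1
    have h01 : e0 ≤ e1 := by
      rw [he1]; split_ifs <;> omega
    have hw : w <+: cs.drop i → i + w.length ≤ e1 := by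
      intro hp
      rw [he1, if_pos ((PySem.Chars.startswith_iff _ _).mpr hp)]
      split_ifs <;> omega
    refine ⟨by omega, ?_, ?_⟩
    · rintro v hv hp
      rcases List.mem_cons.mp hv with hv | hv
      · subst hv; exact le_trans (hw hp) ih1
      · exact ih2 v hv hp
    · rcases ih3 with h | ⟨v, hv, hp, he⟩
      · by_cases hs : PySem.Chars.startswith (cs.drop i) w
        · by_cases hgt : i + w.length > e0
          · exact Or.inr ⟨w, List.mem_cons_self .., (PySem.Chars.startswith_iff _ _).mp hs,
              by rw [h, he1, if_pos hs, if_pos hgt]⟩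
          · exact Or.inl (by rw [h, he1, if_pos hs, if_neg hgt])
        · exact Or.inl (by rw [h, he1, if_neg hs])
      · exact Or.inr ⟨v, List.mem_cons_of_mem _ hv, hp, he⟩

lemma mem_byFirst_foldl (ws : List (List Char)) :
    ∀ (d : PySem.Dict Char (List (List Char))) (c : Char) (w : List Char),
      w ∈ (ws.foldl (fun d w => match w with
        | [] => d
        | c :: _ => d.modify c [] (· ++ [w])) d).getD c [] ↔
      w ∈ d.getD c [] ∨ (w ∈ ws ∧ ∃ t, w = c :: t) := by
  induction ws with
  | nil => intro d c w; simp
  | cons v ws ih =>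
    intro d c w
    simp only [List.foldl_cons]
    cases v with
    | nil =>
      rw [ih]
      simp only [List.mem_cons]
      constructor
      · rintro (h | ⟨hv, t, ht⟩)
        · exact Or.inl h
        · exact Or.inr ⟨Or.inr hv, t, ht⟩
      · rintro (h | ⟨hv | hv, t, ht⟩)
        · exact Or.inl h
        · subst hv; simp at ht
        · exact Or.inr ⟨hv, t, ht⟩
    | cons c' t' =>
      rw [ih]
      rw [PySem.Dict.getD_modify]
      by_cases hc : c = c'
      · subst hc
        rw [if_pos rfl]
        simp only [List.mem_append, List.mem_cons, List.not_mem_nil, or_false]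
        constructor
        · rintro ((h | h) | ⟨hv, t, ht⟩)
          · exact Or.inl h
          · exact Or.inr ⟨Or.inl h, t', by rw [h]⟩
          · exact Or.inr ⟨Or.inr hv, t, ht⟩
        · rintro (h | ⟨hv | hv, t, ht⟩)
          · exact Or.inl (Or.inl h)
          · exact Or.inl (Or.inr hv)
          · exact Or.inr ⟨hv, t, ht⟩
      · rw [if_neg hc]
        simp only [List.mem_cons]
        constructor
        · rintro (h | ⟨hv, t, ht⟩)
          · exact Or.inl h
          · exact Or.inr ⟨Or.inr hv, t, ht⟩
        · rintro (h | ⟨hv | hv, t, ht⟩)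
          · exact Or.inl h
          · subst hv; rw [List.cons.injEq] at ht; exact absurd ht.1.symm hc
          · exact Or.inr ⟨hv, t, ht⟩

lemma mem_byFirst (ws : List (List Char)) (c : Char) (w : List Char) :
    w ∈ (byFirst ws).getD c [] ↔ w ∈ ws ∧ ∃ t, w = c :: t := by
  rw [byFirst, mem_byFirst_foldl]
  simp

lemma outerFold (cs : List Char) (ws : List (List Char)) :
    ∀ (m i e : Nat) (mask : List Bool),
      i + m ≤ cs.length →
      mask.length = i →
      (∀ j w, j < i → w ∈ ws → w ≠ [] → w <+: cs.drop j → j + w.length ≤ e) →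
      (e = 0 ∨ ∃ j, j < i ∧ ∃ w ∈ ws, w <+: cs.drop j ∧ e = j + w.length) →
      (∀ k, k < i → (mask.getD k false = true ↔ covered cs ws k)) →
      ((List.range' i m).foldl (fun (st : Nat × List Bool) i =>
          let e := ((byFirst ws).getD (cs.getD i ' ') []).foldl (fun e w =>
            if PySem.Chars.startswith (cs.drop i) w then
              (if i + w.length > e then i + w.length else e)
            else e) st.1
          (e, st.2 ++ [decide (i < e)])) (e, mask)).2.length = i + m ∧
      ∀ k, k < i + m →
        (((List.range' i m).foldl (fun (st : Nat × List Bool) i =>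
          let e := ((byFirst ws).getD (cs.getD i ' ') []).foldl (fun e w =>
            if PySem.Chars.startswith (cs.drop i) w then
              (if i + w.length > e then i + w.length else e)
            else e) st.1
          (e, st.2 ++ [decide (i < e)])) (e, mask)).2.getD k false = true ↔ covered cs ws k) := by
  intro m
  induction m with
  | zero =>
    intro i e mask hnm hlen hb hc hd
    simpa [hlen] using hd
  | succ m ih =>
    intro i e mask hnm hlen hb hc hd
    have hin : i < cs.length := by omega
    rw [List.range'_succ, List.foldl_cons]
    simp only []
    set pats := (byFirst ws).getD (cs.getD i ' ') [] with hpats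
    set e' := pats.foldl (fun e w =>
      if PySem.Chars.startswith (cs.drop i) w then
        (if i + w.length > e then i + w.length else e)
      else e) e with he'
    obtain ⟨i1, i2, i3⟩ := innerFold_spec cs i pats e
    rw [← he'] at i1 i2 i3
    -- every pattern of the bucket is a pattern of ws
    have hsub : ∀ w ∈ pats, w ∈ ws := fun w hw => ((mem_byFirst ws _ w).mp hw).1
    -- a nonempty pattern matching at i lies in the bucket looked up at i
    have hbucket : ∀ w ∈ ws, w ≠ [] → w <+: cs.drop i → w ∈ pats := by
      intro w hw hwne hp
      cases w with
      | nil => exact absurd rfl hwne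
      | cons c t =>
        obtain ⟨s, hs⟩ := hp
        have hci : cs[i]? = some c := by
          rw [← List.head?_drop, ← hs]; rfl
        have hgd : cs.getD i ' ' = c := by
          rw [List.getD_eq_getElem?_getD, hci]; rfl
        rw [hpats, hgd]
        exact (mem_byFirst ws c (c :: t)).mpr ⟨hw, t, rfl⟩
    have hb' : ∀ j w, j < i + 1 → w ∈ ws → w ≠ [] → w <+: cs.drop j → j + w.length ≤ e' := by
      intro j w hj hw hwne hp
      rcases Nat.lt_or_ge j i with hji | hji
      · exact le_trans (hb j w hji hw hwne hp) i1
      · have : j = i := by omega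
        subst this
        exact i2 w (hbucket w hw hwne hp) hp
    have hc' : e' = 0 ∨ ∃ j, j < i + 1 ∧ ∃ w ∈ ws, w <+: cs.drop j ∧ e' = j + w.length := by
      rcases i3 with h | ⟨w, hw, hp, he⟩
      · rcases hc with h0 | ⟨j, hj, w, hw, hp, hee⟩
        · exact Or.inl (by omega)
        · exact Or.inr ⟨j, by omega, w, hw, hp, by omega⟩
      · exact Or.inr ⟨i, by omega, w, hsub w hw, hp, he⟩
    have hd' : ∀ k, k < i + 1 → ((mask ++ [decide (i < e')]).getD k false = true ↔ covered cs ws k) := by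
      intro k hk
      rcases Nat.lt_or_ge k i with hki | hki
      · rw [List.getD_append _ _ _ _ (by omega)]
        exact hd k hki
      · have hkeq : k = i := by omega
        subst hkeq
        have : (mask ++ [decide (k < e')]).getD k false = decide (k < e') := by
          rw [show k = mask.length from hlen.symm]
          simp [List.getD_eq_getElem?_getD]
        rw [this]
        simp only [decide_eq_true_eq]
        constructor
        · intro hke
          rcases i3 with h | ⟨w, hw, hp, he⟩
          · rw [h] at hke
            rcases hc with h0 | ⟨j, hj, w, hw, hp, hee⟩
            · omega
            · exact ⟨w, hw, j, hp, by omega, by omega⟩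
          · exact ⟨w, hsub w hw, k, hp, le_refl _, by omega⟩
        · rintro ⟨w, hw, j, hp, hji, hix⟩
          have hwne : w ≠ [] := by
            intro hw0
            rw [hw0] at hix
            simp at hix
            omega
          rcases Nat.lt_or_ge j k with hjk | hjk
          · have := hb j w hjk hw hwne hp
            omega
          · have : j = k := by omega
            subst this
            have := i2 w (hbucket w hw hwne hp) hp
            omega
    have := ih (i + 1) e' (mask ++ [decide (i < e')]) (by omega) (by simp [hlen]) hb' hc' hd'
    refine ⟨by rw [this.1]; omega, fun k hk => this.2 k (by omega)⟩

lemma build_aux : ∀ (N : Nat) (l : List (Char × Bool)), l.length ≤ N →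
    (buildA l = gB false l) ∧
    (String.ofList ((l.takeWhile (·.2)).map (·.1)) ++ "</i>" ++ buildA (l.dropWhile (·.2)) =
      (if gBnext l then "" else "</i>") ++ gB true l) := by
  intro N
  induction N with
  | zero =>
    rintro (_ | ⟨p, rest⟩) hl
    · exact ⟨by simp [buildA, gB], by simp [buildA, gB, gBnext]⟩
    · simp at hl
  | succ N ih =>
    rintro (_ | ⟨⟨c, b⟩, rest⟩) hl
    · exact ⟨by simp [buildA, gB], by simp [buildA, gB, gBnext]⟩
    · have hr := ih rest (by simp at hl ⊢; omega)
      have h2 : String.ofList ((rest.takeWhile (·.2)).map (·.1)) ++ ("</i>" ++ buildA (rest.dropWhile (·.2))) =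
          (if gBnext rest then "" else "</i>") ++ gB true rest := by
        rw [← String.append_assoc]; exact hr.2
      constructor
      · cases b with
        | false =>
          rw [buildA, gB, hr.1]
          simp
        | true =>
          rw [buildA, gB]
          have e1 : String.ofList (c :: (rest.takeWhile (·.2)).map (·.1)) =
              String.ofList [c] ++ String.ofList ((rest.takeWhile (·.2)).map (·.1)) := by
            rw [← String.ofList_append]; simp
          rw [e1]
          simp only [Bool.true_and, Bool.not_false, if_true, String.append_assoc, h2]
          cases hgn : gBnext rest <;> simp
      · cases b with
        | false =>
          rw [List.takeWhile_cons, List.dropWhile_cons]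
          simp only [Bool.false_eq_true, if_false, List.map_nil]
          rw [buildA, gB, hr.1]
          simp [show gBnext ((c, false) :: rest) = false from rfl]
        | true =>
          rw [List.takeWhile_cons, List.dropWhile_cons]
          simp only [if_pos trivial]
          have e1 : String.ofList (c :: (rest.takeWhile (·.2)).map (·.1)) =
              String.ofList [c] ++ String.ofList ((rest.takeWhile (·.2)).map (·.1)) := by
            rw [← String.ofList_append]; simp
          cases hgn : gBnext rest <;> rw [hgn] at h2 <;>
            simp [gB, show gBnext ((c, true) :: rest) = true from rfl, e1, hgn,
              String.append_assoc, h2]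

lemma buildB_eq_gB_aux (ps : List (Char × Bool)) :
    ∀ (prev : Bool) (acc : String),
      ((ps.zip ((ps.map (·.2)).drop 1 ++ [false])).foldl (fun (st : Bool × String) p =>
        (p.1.2, st.2 ++ (if p.1.2 && !st.1 then "<i>" else "") ++ String.ofList [p.1.1]
          ++ (if p.1.2 && !p.2 then "</i>" else ""))) (prev, acc)).2 = acc ++ gB prev ps := by
  induction ps with
  | nil => intro prev acc; simp [gB]
  | cons p rest ih =>
    intro prev acc
    have hz : (p :: rest).zip (((p :: rest).map (·.2)).drop 1 ++ [false]) =
        (p, gBnext rest) :: rest.zip ((rest.map (·.2)).drop 1 ++ [false]) := by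
      cases rest with
      | nil => simp [gBnext]
      | cons q r => simp [gBnext]
    rw [hz, List.foldl_cons, ih]
    obtain ⟨c, b⟩ := p
    rw [gB]
    simp [String.append_assoc]

-- ===== VERDICT (by name: the statement is the Claim_ definition above) =====
theorem emphasizeWords_spec : Claim_equal_emphasizeWords := by
  intro word words _
  unfold Spec_emphasizeWords emphasizeWords emphasizeWords_alt
  simp only []
  set cs := word.toList with hcs
  set ws := words.map (·.toList) with hws
  -- A's flag array
  obtain ⟨a1, a2⟩ := arrA_spec cs words (List.replicate cs.length false) (by simp)
  set arrA := words.foldl (fun arr x => markLoopA cs x.toList (cs.length + 2) 0 arr)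
    (List.replicate cs.length false) with harrA
  -- B's mask
  obtain ⟨b1, b2⟩ := outerFold cs ws cs.length 0 0 [] (by omega) rfl
    (by intro j w hj; omega)
    (Or.inl rfl)
    (by intro k hk; omega)
  rw [Nat.zero_add] at b1
  simp only [Nat.zero_add] at b2
  have hmask : maskB cs ws =
      ((List.range' 0 cs.length).foldl (fun (st : Nat × List Bool) i =>
        let e := ((byFirst ws).getD (cs.getD i ' ') []).foldl (fun e w =>
          if PySem.Chars.startswith (cs.drop i) w then
            (if i + w.length > e then i + w.length else e)
          else e) st.1
        (e, st.2 ++ [decide (i < e)])) (0, [])).2 := by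
    rw [maskB, List.range_eq_range']
  -- the two flag lists coincide
  have harr_eq : arrA = maskB cs ws := by
    apply List.ext_getElem
    · rw [a1, hmask, b1]
    · intro i h1 h2
      have hin : i < cs.length := by rw [a1] at h1; exact h1
      have hA : arrA.getD i false = true ↔ covered cs ws i := by
        rw [a2 i]
        have : (List.replicate cs.length false).getD i false = false := by
          simp only [List.getD_eq_getElem?_getD, List.getElem?_replicate]
          rw [if_pos hin]; rfl
        rw [this]
        simp [hws]
      have hB : (maskB cs ws).getD i false = true ↔ covered cs ws i := by
        rw [hmask]; exact b2 i hin
      have hgd : arrA.getD i false = (maskB cs ws).getD i false := by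
        rcases Bool.eq_false_or_eq_true (arrA.getD i false) with h | h <;>
          rcases Bool.eq_false_or_eq_true ((maskB cs ws).getD i false) with h' | h'
        case inl.inl => rw [h, h']
        case inl.inr => exact absurd (hB.mpr (hA.mp h)) (by rw [h']; simp)
        case inr.inl => exact absurd (hA.mpr (hB.mp h')) (by rw [h]; simp)
        case inr.inr => rw [h, h']
      rw [List.getD_eq_getElem _ _ h1, List.getD_eq_getElem _ _ h2] at hgd
      exact hgd
  rw [harr_eq, (build_aux (cs.zip (maskB cs ws)).length _ (le_refl _)).1]
  have hsnd : (cs.zip (maskB cs ws)).map (·.2) = maskB cs ws := by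
    apply List.map_snd_zip
    rw [hmask, b1]
  rw [buildB]
  have := buildB_eq_gB_aux (cs.zip (maskB cs ws)) false ""
  rw [hsnd] at this
  rw [this]
  simp
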